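-- pv_equiv track=rewrite | github.com/ClausElmann/analysis-tool | core/system_fusion.py | _tokens_overlap
-- ===== SOURCE A (Python) =====
-- from typing import Any, Dict, List, Set
--
-- def _tokens_overlap(t1: Set[str], t2: Set[str]) -> bool:
--     """Return True if any token in *t1* matches any token in *t2*.
--
--     Matching uses exact equality first, then prefix matching (min len 4)
--     to handle common singular/plural pairs like 'customer'/'customers'.
--     """
--     if t1 & t2:
--         return True
--     for a in t1:
--         for b in t2:
--             short, long_ = (a, b) if len(a) <= len(b) else (b, a)
--             if len(short) >= 4 and long_.startswith(short):
--                 return True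
--     return False
-- ===== SOURCE B (Python) =====
-- def _tokens_overlap(t1, t2):
--     """Hash-indexed re-implementation: index every length>=4 prefix of one
--     set's tokens so the other set is checked by O(1) lookups instead of
--     pairwise scans."""
--     if not t1.isdisjoint(t2):
--         return True
--     pref2 = {b[:k] for b in t2 for k in range(4, len(b) + 1)}
--     if any(len(a) >= 4 and a in pref2 for a in t1):
--         return True
--     pref1 = {a[:k] for a in t1 for k in range(4, len(a) + 1)}
--     return any(len(b) >= 4 and b in pref1 for b in t2)
-- ===== Notes on version B (the rewrite author's own statement) =====
-- stated objective: alternative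
-- what changed: Replaces A's nested pairwise loop with startswith on every (a,b) pair by a hash set of all length>=4 prefixes of each side's tokens, so each token of the other side is tested with a single set lookup instead of a scan over the whole other set.
import Mathlib
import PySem

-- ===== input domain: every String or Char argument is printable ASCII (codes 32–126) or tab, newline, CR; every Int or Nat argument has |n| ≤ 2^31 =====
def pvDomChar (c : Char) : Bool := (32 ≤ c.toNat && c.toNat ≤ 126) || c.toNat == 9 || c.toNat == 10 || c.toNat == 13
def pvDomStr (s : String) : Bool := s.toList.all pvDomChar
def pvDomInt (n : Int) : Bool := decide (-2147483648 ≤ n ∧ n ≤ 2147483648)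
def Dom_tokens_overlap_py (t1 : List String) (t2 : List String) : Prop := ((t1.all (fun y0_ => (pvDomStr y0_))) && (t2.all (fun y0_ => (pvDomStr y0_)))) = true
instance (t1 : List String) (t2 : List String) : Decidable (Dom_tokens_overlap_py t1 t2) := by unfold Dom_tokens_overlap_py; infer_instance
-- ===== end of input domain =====

-- B replaces A's nested pairwise startswith scan by a hash set of all length≥4
-- prefixes of each side checked by membership lookups; same return value everywhere.

-- ===== PORT A =====
def tokens_overlap_py (t1 : List String) (t2 : List String) : Bool :=
  -- `if t1 & t2: return True`
  if PySem.Set.inter (PySem.Set.ofList t1) (PySem.Set.ofList t2) ≠ [] then true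
  else
    -- nested `for` loops with early `return True`
    t1.any (fun a => t2.any (fun b =>
      let sl := if PySem.Str.len a ≤ PySem.Str.len b then (a, b) else (b, a)
      decide (4 ≤ PySem.Str.len sl.1) && PySem.Str.startswith sl.2 sl.1))

-- ===== PORT B =====
-- `{b[:k] for b in ts for k in range(4, len(b) + 1)}`
def pvPrefixSet (ts : List String) : PySem.Set String :=
  PySem.Set.ofList (ts.flatMap (fun b =>
    (PySem.List.pyRange 4 (PySem.Str.len b + 1)).map (fun k => PySem.Str.slice b none (some k))))

def tokens_overlap_py_alt (t1 : List String) (t2 : List String) : Bool :=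
  if PySem.Set.isdisjoint (PySem.Set.ofList t1) (PySem.Set.ofList t2) = false then true
  else if t1.any (fun a => decide (4 ≤ PySem.Str.len a) && PySem.Set.contains (pvPrefixSet t2) a) then true
  else t2.any (fun b => decide (4 ≤ PySem.Str.len b) && PySem.Set.contains (pvPrefixSet t1) b)

-- ===== PRECONDITION & SPEC =====
def Spec_tokens_overlap_py (t1 : List String) (t2 : List String) (out : Bool) : Prop := out = tokens_overlap_py_alt t1 t2
instance (t1 : List String) (t2 : List String) (out : Bool) : Decidable (Spec_tokens_overlap_py t1 t2 out) := by unfold Spec_tokens_overlap_py; infer_instance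

-- ===== CLAIM (what is proved, stated in full; the proofs are below) =====
def Claim_equal_tokens_overlap_py : Prop := ∀ (t1 : List String) (t2 : List String), Dom_tokens_overlap_py t1 t2 → Spec_tokens_overlap_py t1 t2 (tokens_overlap_py t1 t2)

-- ===== LEMMAS AND PROOFS =====

-- the common semantic condition both programs decide
def pvOverlapProp (t1 t2 : List String) : Prop :=
  (∃ a ∈ t1, a ∈ t2) ∨
  ∃ a ∈ t1, ∃ b ∈ t2,
    (4 ≤ a.toList.length ∧ a.toList <+: b.toList) ∨ (4 ≤ b.toList.length ∧ b.toList <+: a.toList)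

theorem pv_pair_iff (a b : String) :
    ((let sl := if PySem.Str.len a ≤ PySem.Str.len b then (a, b) else (b, a)
      decide (4 ≤ PySem.Str.len sl.1) && PySem.Str.startswith sl.2 sl.1) = true) ↔
    ((4 ≤ a.toList.length ∧ a.toList <+: b.toList) ∨
     (4 ≤ b.toList.length ∧ b.toList <+: a.toList)) := by
  simp only [Bool.and_eq_true, decide_eq_true_eq, PySem.Str.startswith_eq,
    PySem.Chars.startswith_iff, PySem.Str.len_eq]
  split_ifs with hab
  · have hab' : a.toList.length ≤ b.toList.length := by exact_mod_cast hab
    constructor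
    · rintro ⟨h4, hp⟩
      exact Or.inl ⟨by exact_mod_cast h4, hp⟩
    · rintro (⟨h4, hp⟩ | ⟨h4, hp⟩)
      · exact ⟨by exact_mod_cast h4, hp⟩
      · have hba : b.toList.length ≤ a.toList.length := hp.length_le
        have heq : b.toList = a.toList := hp.eq_of_length (by omega)
        refine ⟨by exact_mod_cast (by omega : 4 ≤ a.toList.length), ?_⟩
        rw [heq]
  · constructor
    · rintro ⟨h4, hp⟩
      exact Or.inr ⟨by exact_mod_cast h4, hp⟩
    · rintro (⟨h4, hp⟩ | ⟨h4, hp⟩)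
      · have hle : a.toList.length ≤ b.toList.length := hp.length_le
        exact absurd (show (a.toList.length : Int) ≤ (b.toList.length : Int) by exact_mod_cast hle) hab
      · exact ⟨by exact_mod_cast h4, hp⟩

theorem pv_A_iff (t1 t2 : List String) :
    tokens_overlap_py t1 t2 = true ↔ pvOverlapProp t1 t2 := by
  unfold tokens_overlap_py pvOverlapProp
  split_ifs with h
  · simp only [true_iff]
    obtain ⟨y, hy⟩ := List.exists_mem_of_ne_nil _ h
    rw [PySem.Set.mem_inter, PySem.Set.mem_ofList, PySem.Set.mem_ofList] at hy
    exact Or.inl ⟨y, hy.1, hy.2⟩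
  · push_neg at h
    have hnc : ¬ ∃ a ∈ t1, a ∈ t2 := by
      rintro ⟨y, hy1, hy2⟩
      have : y ∈ PySem.Set.inter (PySem.Set.ofList t1) (PySem.Set.ofList t2) := by
        rw [PySem.Set.mem_inter, PySem.Set.mem_ofList, PySem.Set.mem_ofList]
        exact ⟨hy1, hy2⟩
      rw [h] at this
      exact absurd this (List.not_mem_nil)
    simp only [List.any_eq_true]
    constructor
    · rintro ⟨a, ha, b, hb, hp⟩
      exact Or.inr ⟨a, ha, b, hb, (pv_pair_iff a b).mp hp⟩
    · rintro (hc | ⟨a, ha, b, hb, hq⟩)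
      · exact absurd hc hnc
      · exact ⟨a, ha, b, hb, (pv_pair_iff a b).mpr hq⟩

theorem pv_mem_prefixSet (ts : List String) (a : String) :
    ((decide (4 ≤ PySem.Str.len a) && PySem.Set.contains (pvPrefixSet ts) a) = true) ↔
    ∃ b ∈ ts, 4 ≤ a.toList.length ∧ a.toList <+: b.toList := by
  unfold pvPrefixSet
  simp only [Bool.and_eq_true, decide_eq_true_eq, PySem.Set.contains_iff,
    PySem.Set.mem_ofList, List.mem_flatMap, List.mem_map, PySem.List.mem_pyRange_one,
    PySem.Str.len_eq]
  constructor
  · rintro ⟨h4, b, hb, k, ⟨hk4, hklt⟩, hslice⟩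
    have hk0 : (0 : Int) ≤ k := by omega
    have htl : a.toList = b.toList.take k.toNat := by
      rw [← hslice, PySem.Str.toList_slice, PySem.Chars.slice_eq_listSlice,
        PySem.List.slice_to _ hk0]
    refine ⟨b, hb, ⟨by exact_mod_cast h4, ?_⟩⟩
    rw [htl]; exact List.take_prefix _ _
  · rintro ⟨b, hb, h4, hp⟩
    have hle : a.toList.length ≤ b.toList.length := hp.length_le
    refine ⟨by exact_mod_cast h4, b, hb, (a.toList.length : Int), ⟨by exact_mod_cast h4, by omega⟩, ?_⟩
    rw [← String.toList_inj, PySem.Str.toList_slice, PySem.Chars.slice_eq_listSlice,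
      PySem.List.slice_to _ (by positivity)]
    have := List.prefix_iff_eq_take.mp hp
    simp only [Int.toNat_natCast]
    exact this.symm

theorem pv_B_iff (t1 t2 : List String) :
    tokens_overlap_py_alt t1 t2 = true ↔ pvOverlapProp t1 t2 := by
  unfold tokens_overlap_py_alt pvOverlapProp
  split_ifs with hdis h1
  · simp only [true_iff]
    have hne : ¬ (PySem.Set.isdisjoint (PySem.Set.ofList t1) (PySem.Set.ofList t2) = true) := by
      simp [hdis]
    rw [PySem.Set.isdisjoint_iff] at hne
    push_neg at hne
    obtain ⟨y, hy1, hy2⟩ := hne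
    rw [PySem.Set.mem_ofList] at hy1 hy2
    exact Or.inl ⟨y, hy1, hy2⟩
  · simp only [true_iff]
    rw [List.any_eq_true] at h1
    obtain ⟨a, ha, hmem⟩ := h1
    obtain ⟨b, hb, h4, hp⟩ := (pv_mem_prefixSet t2 a).mp hmem
    exact Or.inr ⟨a, ha, b, hb, Or.inl ⟨h4, hp⟩⟩
  · have hnc : ¬ ∃ a ∈ t1, a ∈ t2 := by
      rintro ⟨y, hy1, hy2⟩
      have hd : PySem.Set.isdisjoint (PySem.Set.ofList t1) (PySem.Set.ofList t2) = true := by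
        cases hh : PySem.Set.isdisjoint (PySem.Set.ofList t1) (PySem.Set.ofList t2)
        · exact absurd hh hdis
        · rfl
      rw [PySem.Set.isdisjoint_iff] at hd
      exact hd y (by rw [PySem.Set.mem_ofList]; exact hy1) (by rw [PySem.Set.mem_ofList]; exact hy2)
    rw [List.any_eq_true]
    constructor
    · rintro ⟨b, hb, hmem⟩
      obtain ⟨a, ha, h4, hp⟩ := (pv_mem_prefixSet t1 b).mp hmem
      exact Or.inr ⟨a, ha, b, hb, Or.inr ⟨h4, hp⟩⟩
    · rintro (hc | ⟨a, ha, b, hb, (⟨h4, hp⟩ | ⟨h4, hp⟩)⟩)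
      · exact absurd hc hnc
      · exact absurd (List.any_eq_true.mpr ⟨a, ha, (pv_mem_prefixSet t2 a).mpr ⟨b, hb, h4, hp⟩⟩) h1
      · exact ⟨b, hb, (pv_mem_prefixSet t1 b).mpr ⟨a, ha, h4, hp⟩⟩

-- ===== VERDICT (by name: the statement is the Claim_ definition above) =====
theorem tokens_overlap_py_spec : Claim_equal_tokens_overlap_py := by
  intro t1 t2 _
  unfold Spec_tokens_overlap_py
  rw [Bool.eq_iff_iff, pv_A_iff, pv_B_iff]
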